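-- pv_equiv track=rewrite | github.com/giangchicken/test_multithread_py313 | tools/preprocessing.py | remove_specific_links
-- ===== SOURCE A (Python) =====
-- def remove_specific_links(url_list):
--   """Removes links containing specific keywords from a list of URLs."""
--   if not isinstance(url_list, list):
--     return []
--   keywords = ["topcv", "masothue", "thuvienphapluat", "masocongty", "massothue", "ma-so-thue",
--               "tratencongty", "hosocongty", "trangvangdoanhnghiep", "vieclam24h", "vnmore", "dauthau.net",
--               "doanhnghiep.biz", "infocom", "baogiaothong.vn", "facebook", "yellowpages", "nhathuygroup",
--               "phaply.net", "fiingate.vn", "ibaohiem"]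
--   filtered_urls = [url for url in url_list if not any(keyword in url for keyword in keywords)]
--   return filtered_urls
-- ===== SOURCE B (Python) =====
-- def remove_specific_links(url_list):
--     """Removes links containing specific keywords from a list of URLs."""
--     if not isinstance(url_list, list):
--         return []
--     keywords = ["topcv", "masothue", "thuvienphapluat", "masocongty", "massothue", "ma-so-thue",
--                 "tratencongty", "hosocongty", "trangvangdoanhnghiep", "vieclam24h", "vnmore", "dauthau.net",
--                 "doanhnghiep.biz", "infocom", "baogiaothong.vn", "facebook", "yellowpages", "nhathuygroup",
--                 "phaply.net", "fiingate.vn", "ibaohiem"]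
--     out = []
--     for url in url_list:
--         hit = False
--         i = 0
--         n = len(url)
--         while i < n and not hit:
--             for k in keywords:
--                 if url.startswith(k, i):
--                     hit = True
--                     break
--             i += 1
--         if not hit:
--             out.append(url)
--     return out
-- ===== Notes on version B (the rewrite author's own statement) =====
-- stated objective: alternative
-- what changed: Replaces the keyword-major nested membership test (any(keyword in url)) by a position-major scan: each URL is traversed once left to right and at each position every keyword is tested as a prefix, a naive multi-pattern matcher with an early exit on the first hit.
import Mathlib
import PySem

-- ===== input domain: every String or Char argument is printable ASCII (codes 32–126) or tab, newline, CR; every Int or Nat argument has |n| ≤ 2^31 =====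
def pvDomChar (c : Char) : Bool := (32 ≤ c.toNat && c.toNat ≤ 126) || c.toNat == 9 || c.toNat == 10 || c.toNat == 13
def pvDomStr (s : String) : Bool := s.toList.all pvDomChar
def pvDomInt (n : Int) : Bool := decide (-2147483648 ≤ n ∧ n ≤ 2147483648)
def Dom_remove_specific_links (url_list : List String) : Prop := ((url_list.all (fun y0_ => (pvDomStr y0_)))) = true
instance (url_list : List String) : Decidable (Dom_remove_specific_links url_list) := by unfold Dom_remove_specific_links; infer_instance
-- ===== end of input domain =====

-- B replaces the keyword-major nested membership test by a position-major single
-- left-to-right scan of each URL with per-position prefix tests (alternative structure, same cost).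


-- the blacklist literal shared by both Pythons (pure data, used by both ports)
def pvKeywords : List String :=
  ["topcv", "masothue", "thuvienphapluat", "masocongty", "massothue", "ma-so-thue",
   "tratencongty", "hosocongty", "trangvangdoanhnghiep", "vieclam24h", "vnmore", "dauthau.net",
   "doanhnghiep.biz", "infocom", "baogiaothong.vn", "facebook", "yellowpages", "nhathuygroup",
   "phaply.net", "fiingate.vn", "ibaohiem"]

-- ===== PORT A =====
-- [url for url in url_list if not any(keyword in url for keyword in keywords)]
-- ('keyword in url' is PySem.Str.isIn; the isinstance guard is vacuous under the List String type)
def remove_specific_links (url_list : List String) : List String :=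
  url_list.filter (fun url => ! pvKeywords.any (fun keyword => PySem.Str.isIn keyword url))

-- ===== PORT B =====
-- the 'while i < n and not hit: for k in keywords: if url.startswith(k, i): hit = True; break'
-- scan: recursion over the suffixes of the URL, prefix test per position, short-circuit on a hit
def pvHitFrom : List Char → Bool
  | [] => false
  | c :: rest => pvKeywords.any (fun k => k.toList.isPrefixOf (c :: rest)) || pvHitFrom rest

-- 'out = []; for url in url_list: … ; if not hit: out.append(url)'
def remove_specific_links_alt (url_list : List String) : List String :=
  url_list.foldl (fun out url => if pvHitFrom url.toList then out else out ++ [url]) []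

-- ===== PRECONDITION & SPEC =====
def Spec_remove_specific_links (url_list : List String) (out : List String) : Prop := out = remove_specific_links_alt url_list
instance (url_list : List String) (out : List String) : Decidable (Spec_remove_specific_links url_list out) := by unfold Spec_remove_specific_links; infer_instance

-- ===== CLAIM (what is proved, stated in full; the proofs are below) =====
def Claim_equal_remove_specific_links : Prop := ∀ (url_list : List String), Dom_remove_specific_links url_list → Spec_remove_specific_links url_list (remove_specific_links url_list)

-- ===== LEMMAS AND PROOFS =====

theorem pvKeywords_ne_nil : ∀ k ∈ pvKeywords, k.toList ≠ [] := by decide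

theorem pvHitFrom_iff (cs : List Char) :
    pvHitFrom cs = true ↔ ∃ k ∈ pvKeywords, k.toList <:+: cs := by
  induction cs with
  | nil =>
    simp only [pvHitFrom, Bool.false_eq_true, false_iff]
    rintro ⟨k, hk, hinf⟩
    exact pvKeywords_ne_nil k hk (List.eq_nil_of_infix_nil hinf)
  | cons c rest ih =>
    simp only [pvHitFrom, Bool.or_eq_true, List.any_eq_true,
      List.isPrefixOf_iff_prefix, ih, List.infix_cons_iff]
    constructor
    · rintro (⟨k, hk, h⟩ | ⟨k, hk, h⟩)
      · exact ⟨k, hk, Or.inl h⟩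
      · exact ⟨k, hk, Or.inr h⟩
    · rintro ⟨k, hk, h | h⟩
      · exact Or.inl ⟨k, hk, h⟩
      · exact Or.inr ⟨k, hk, h⟩

theorem hit_eq_any_isIn (url : String) :
    pvKeywords.any (fun keyword => PySem.Str.isIn keyword url) = pvHitFrom url.toList := by
  rw [Bool.eq_iff_iff]
  simp only [List.any_eq_true, PySem.Str.isIn_iff_infix, pvHitFrom_iff]

theorem foldl_skip_if {α : Type} (p : α → Bool) (l : List α) (acc : List α) :
    l.foldl (fun out x => if p x then out else out ++ [x]) acc = acc ++ l.filter (fun x => !p x) := by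
  induction l generalizing acc with
  | nil => simp
  | cons x xs ih =>
    simp only [List.foldl_cons, List.filter_cons, ih]
    by_cases h : p x = true <;> simp [h]

-- ===== VERDICT (by name: the statement is the Claim_ definition above) =====
theorem remove_specific_links_spec : Claim_equal_remove_specific_links := by
  intro url_list _
  unfold Spec_remove_specific_links remove_specific_links remove_specific_links_alt
  rw [foldl_skip_if, List.nil_append]
  apply List.filter_congr
  intro u _
  rw [hit_eq_any_isIn]
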